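-- pv_equiv track=rewrite | github.com/xco2/smolvlm2-500M-illustration-description | train_grpo.py | check_repeat
-- ===== SOURCE A (Python) =====
-- def check_repeat(text: str) -> bool:
--     # 去除空白符
--     # text = content.replace('\n', '').replace(' ', '')
--     # 设定最小重复片段长度（比如15个字），和最大允许重复次数
--     max_len = 40
--     max_repeat = 2
--     n = len(text)
--     # 只检测较长文本
--     if n < max_len * 2:
--         return False
--     # 用滑动窗口检测重复片段
--     res = False
--     for size in range(max_len, max_len - 15, -1):
--         substr_count = {}
--         for i in range(n - size + 1):
--             substr = text[i:i + size]
--             if substr in substr_count: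
--                 substr_count[substr] += 1
--             else:
--                 substr_count[substr] = 1
--             if substr_count[substr] >= max_repeat:
--                 return True
--     return False
-- ===== SOURCE B (Python) =====
-- def check_repeat(text: str) -> bool:
--     # Any repeated block of length 26..40 repeats its length-26 prefix, so one
--     # pass over length-26 windows with a seen-set suffices.
--     if len(text) < 80:
--         return False
--     seen = set()
--     for i in range(len(text) - 25):
--         s = text[i:i + 26]
--         if s in seen:
--             return True
--         seen.add(s)
--     return False
-- ===== Notes on version B (the rewrite author's own statement) =====
-- stated objective: faster
-- what changed: Replaced the 15-size sliding-window scan with dict counters by the observation that a repeat of any length 26..40 implies a repeat of its length-26 prefix, so a single pass over length-26 windows with one seen-set decides the same predicate.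
import Mathlib
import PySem

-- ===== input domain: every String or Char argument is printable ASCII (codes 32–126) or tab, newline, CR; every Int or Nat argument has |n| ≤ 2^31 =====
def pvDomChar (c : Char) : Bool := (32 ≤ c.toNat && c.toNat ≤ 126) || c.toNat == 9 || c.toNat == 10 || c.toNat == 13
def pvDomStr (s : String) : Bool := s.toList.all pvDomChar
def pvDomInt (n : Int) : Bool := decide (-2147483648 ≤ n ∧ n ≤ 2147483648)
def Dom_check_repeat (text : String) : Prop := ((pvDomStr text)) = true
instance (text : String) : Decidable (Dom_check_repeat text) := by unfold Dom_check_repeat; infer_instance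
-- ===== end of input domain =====

-- B replaces A's 15-size sliding-window scan with dict counters by one pass over length-26 windows
-- with a seen-set (a repeat of any length 26..40 implies a repeat of its length-26 prefix); objective: faster.


-- ===== PORT A =====
-- inner loop: 'for i in range(n - size + 1): …' over the dict substr_count, early return on count ≥ 2
def pvInnerA (l : List Char) (size : Int) : List Int → PySem.Dict (List Char) Int → Bool
  | [], _ => false
  | i :: rest, d =>
    let substr := PySem.List.slice l (some i) (some (i + size))
    let d' := if d.contains substr then d.modify substr 0 (· + 1) else d.insert substr 1
    if 2 ≤ d'.getD substr 0 then true
    else pvInnerA l size rest d'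

-- outer loop: 'for size in range(max_len, max_len - 15, -1): …'
def pvOuterA (l : List Char) : List Int → Bool
  | [] => false
  | size :: rest =>
    if pvInnerA l size (PySem.List.pyRange 0 ((l.length : Int) - size + 1) 1) PySem.Dict.empty
    then true
    else pvOuterA l rest

def check_repeat (text : String) : Bool :=
  let n : Int := (text.toList.length : Int)
  if n < 40 * 2 then false
  else pvOuterA text.toList (PySem.List.pyRange 40 (40 - 15) (-1))

-- ===== PORT B =====
-- 'for i in range(len(text) - 25): s = text[i:i+26]; if s in seen: return True; seen.add(s)'
def pvLoopB (l : List Char) : List Int → PySem.Set (List Char) → Bool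
  | [], _ => false
  | i :: rest, seen =>
    let s := PySem.List.slice l (some i) (some (i + 26))
    if PySem.Set.contains seen s then true
    else pvLoopB l rest (PySem.Set.add seen s)

def check_repeat_alt (text : String) : Bool :=
  if text.toList.length < 80 then false
  else pvLoopB text.toList (PySem.List.pyRange 0 ((text.toList.length : Int) - 25) 1) PySem.Set.empty

-- ===== PRECONDITION & SPEC =====
def Spec_check_repeat (text : String) (out : Bool) : Prop := out = check_repeat_alt text
instance (text : String) (out : Bool) : Decidable (Spec_check_repeat text out) := by unfold Spec_check_repeat; infer_instance

-- ===== CLAIM (what is proved, stated in full; the proofs are below) =====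
def Claim_equal_check_repeat : Prop := ∀ (text : String), Dom_check_repeat text → Spec_check_repeat text (check_repeat text)

-- ===== LEMMAS AND PROOFS =====

-- the length-`size` windows of l starting at 0, 1, …, M-1
def pvWins (l : List Char) (size M : Nat) : List (List Char) :=
  (List.range M).map (fun k => (l.drop k).take size)

-- B's loop returns true iff some window was already seen or occurs twice
theorem pvLoopB_char (l : List Char) (idxs : List Int) (S : PySem.Set (List Char)) :
    pvLoopB l idxs S = true ↔
      (¬ (idxs.map (fun i => PySem.List.slice l (some i) (some (i + 26)))).Nodup
        ∨ ∃ x ∈ idxs.map (fun i => PySem.List.slice l (some i) (some (i + 26))), x ∈ S) := by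
  induction idxs generalizing S with
  | nil => simp [pvLoopB]
  | cons i rest ih =>
    by_cases h : PySem.List.slice l (some i) (some (i + 26)) ∈ S
    · simp [pvLoopB, h]
    · simp only [pvLoopB, PySem.Set.contains_eq_decide, h, decide_false, Bool.false_eq_true,
        if_false, ih, List.map_cons, List.nodup_cons]
      simp only [PySem.Set.mem_add, List.mem_cons]
      constructor
      · rintro (hn | ⟨x, hx, hxS | rfl⟩)
        · exact Or.inl (fun ⟨_, h2⟩ => hn h2)
        · exact Or.inr ⟨x, Or.inr hx, hxS⟩
        · exact Or.inl (fun ⟨h1, _⟩ => h1 hx)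
      · rintro (hn | ⟨x, hx | hx, hxS⟩)
        · by_cases hm : PySem.List.slice l (some i) (some (i + 26)) ∈
              rest.map (fun i => PySem.List.slice l (some i) (some (i + 26)))
          · exact Or.inr ⟨_, hm, Or.inr rfl⟩
          · refine Or.inl fun hnd => hn ⟨hm, hnd⟩
        · exact absurd (hx ▸ hxS) h
        · exact Or.inr ⟨x, hx, Or.inl hxS⟩

-- A's inner loop returns true iff some window was already counted or occurs twice
theorem pvInnerA_char (l : List Char) (size : Int) (idxs : List Int)
    (d : PySem.Dict (List Char) Int) (hd : ∀ k v, d.get? k = some v → 1 ≤ v) :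
    pvInnerA l size idxs d = true ↔
      (¬ (idxs.map (fun i => PySem.List.slice l (some i) (some (i + size)))).Nodup
        ∨ ∃ x ∈ idxs.map (fun i => PySem.List.slice l (some i) (some (i + size))), d.contains x = true) := by
  induction idxs generalizing d with
  | nil => simp [pvInnerA]
  | cons i rest ih =>
    set w := PySem.List.slice l (some i) (some (i + size)) with hw
    by_cases h : d.contains w = true
    · have hsome : (d.get? w).isSome := by rw [← PySem.Dict.contains_eq_isSome_get?]; exact h
      obtain ⟨v, hv⟩ := Option.isSome_iff_exists.mp hsome
      have h1 : 1 ≤ v := hd w v hv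
      have hget : d.getD w 0 = v := PySem.Dict.getD_of_get?_eq_some d 0 hv
      have : (d.modify w 0 (· + 1)).getD w 0 = v + 1 := by
        rw [PySem.Dict.getD_modify_self, hget]
      simp only [pvInnerA, ← hw, h, if_true, this]
      have : (2 : Int) ≤ v + 1 := by omega
      simp only [this, if_true, true_iff]
      exact Or.inr ⟨w, by simp only [List.map_cons, List.mem_cons]; exact Or.inl hw, h⟩
    · have hnone : d.get? w = none := by
        cases hg : d.get? w with
        | none => rfl
        | some v => exact absurd (by rw [PySem.Dict.contains_eq_isSome_get?, hg]; rfl) h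
      have hgetD : (d.insert w 1).getD w 0 = 1 := PySem.Dict.getD_insert_self ..
      simp only [pvInnerA, ← hw, h, if_false, Bool.false_eq_true, hgetD]
      have h21 : ¬ ((2:Int) ≤ 1) := by omega
      rw [if_neg h21]
      have hd' : ∀ k v, ((d.insert w 1).get? k = some v) → 1 ≤ v := by
        intro k v hkv
        rw [PySem.Dict.get?_insert] at hkv
        split_ifs at hkv with hk
        · cases hkv; omega
        · exact hd k v hkv
      rw [ih _ hd']
      simp only [List.map_cons, List.nodup_cons, List.mem_cons]
      constructor
      · rintro (hn | ⟨x, hx, hxc⟩)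
        · exact Or.inl (fun ⟨_, h2⟩ => hn h2)
        · rw [PySem.Dict.contains_insert] at hxc
          rcases Bool.or_eq_true_iff.mp hxc with hxw | hxd
          · have : x = w := by exact eq_of_beq hxw
            exact Or.inl (fun ⟨h1, _⟩ => h1 (by rwa [this] at hx))
          · exact Or.inr ⟨x, Or.inr hx, hxd⟩
      · rintro (hn | ⟨x, hx | hx, hxc⟩)
        · by_cases hm : w ∈ rest.map (fun i => PySem.List.slice l (some i) (some (i + size)))
          · exact Or.inr ⟨w, hm, by rw [PySem.Dict.contains_insert]; simp⟩
          · exact Or.inl fun hnd => hn ⟨hm, hnd⟩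
        · rw [hx] at hxc; exact absurd hxc h
        · exact Or.inr ⟨x, hx, by rw [PySem.Dict.contains_insert, hxc, Bool.or_true]⟩

theorem pvOuterA_char (l : List Char) (sizes : List Int) :
    pvOuterA l sizes = true ↔
      ∃ size ∈ sizes, ¬ ((PySem.List.pyRange 0 ((l.length : Int) - size + 1) 1).map
          (fun i => PySem.List.slice l (some i) (some (i + size)))).Nodup := by
  induction sizes with
  | nil => simp [pvOuterA]
  | cons s rest ih =>
    simp only [pvOuterA]
    have hchar := pvInnerA_char l s (PySem.List.pyRange 0 ((l.length : Int) - s + 1) 1)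
      PySem.Dict.empty (by simp [PySem.Dict.get?_empty])
    simp only [PySem.Dict.contains_empty, Bool.false_eq_true, and_false,
      exists_const, or_false] at hchar
    by_cases hc : pvInnerA l s (PySem.List.pyRange 0 ((l.length : Int) - s + 1) 1)
        PySem.Dict.empty = true
    · rw [if_pos hc]
      exact iff_of_true rfl ⟨s, List.mem_cons_self .., hchar.mp hc⟩
    · rw [if_neg hc, ih]
      have hno := (not_iff_not.mpr hchar).mp hc
      constructor
      · rintro ⟨sz, hsz, hn⟩; exact ⟨sz, List.mem_cons_of_mem _ hsz, hn⟩
      · rintro ⟨sz, hmem, hn⟩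
        rcases List.mem_cons.mp hmem with rfl | hsz
        · exact absurd hn (by simpa using hno)
        · exact ⟨sz, hsz, hn⟩

-- the mapped slice list IS pvWins, for a Nat window length sz
theorem pv_map_slice_eq_wins (l : List Char) (sz : Nat) :
    (PySem.List.pyRange 0 ((l.length : Int) - (sz : Int) + 1) 1).map
        (fun i => PySem.List.slice l (some i) (some (i + (sz : Int))))
      = pvWins l sz ((l.length : Int) - (sz : Int) + 1).toNat := by
  rw [PySem.List.pyRange_one]
  simp only [Int.sub_zero, List.map_map, pvWins]
  apply List.map_congr_left
  intro k hk
  simp only [Function.comp, zero_add]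
  exact PySem.List.slice_natCast_add l k sz

-- the length-26 instance with Python's numerals 25/26
theorem pv_map_slice_eq_wins26 (l : List Char) :
    (PySem.List.pyRange 0 ((l.length : Int) - 25) 1).map
        (fun i => PySem.List.slice l (some i) (some (i + 26)))
      = pvWins l 26 ((l.length : Int) - 25).toNat := by
  rw [PySem.List.pyRange_one]
  simp only [Int.sub_zero, List.map_map, pvWins]
  apply List.map_congr_left
  intro k hk
  simp only [Function.comp, zero_add]
  have h := PySem.List.slice_natCast_add l k 26
  norm_num at h
  exact h

-- a duplicate among length-sz windows gives a duplicate among length-26 windows (26 ≤ sz)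
theorem pv_dup_mono (l : List Char) (sz M M' : Nat) (h26 : 26 ≤ sz) (hM : M ≤ M')
    (h : ¬ (pvWins l sz M).Nodup) : ¬ (pvWins l 26 M').Nodup := by
  unfold pvWins at *
  rw [List.nodup_map_iff_inj_on (List.nodup_range)] at h ⊢
  push Not at h ⊢
  obtain ⟨i, hi, j, hj, hij, hne⟩ := h
  refine ⟨i, by simp at hi ⊢; omega, j, by simp at hj ⊢; omega, ?_, hne⟩
  have : ((l.drop i).take sz).take 26 = ((l.drop j).take sz).take 26 := by rw [hij]
  rwa [List.take_take, List.take_take, Nat.min_eq_left h26] at this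

-- ===== VERDICT (by name: the statement is the Claim_ definition above) =====
theorem check_repeat_spec : Claim_equal_check_repeat := by
  intro text _
  unfold Spec_check_repeat check_repeat check_repeat_alt
  set l := text.toList with hl
  by_cases hn : (l.length : Int) < 40 * 2
  · rw [if_pos hn, if_pos (by exact_mod_cast hn)]
  · rw [if_neg hn, if_neg (by push Not at hn ⊢; exact_mod_cast hn)]
    have h80 : 80 ≤ l.length := by omega
    rw [Bool.eq_iff_iff, pvOuterA_char, pvLoopB_char]
    simp only [PySem.Set.empty, List.not_mem_nil, and_false, exists_const, or_false]
    rw [pv_map_slice_eq_wins26 l]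
    constructor
    · rintro ⟨size, hmem, hdup⟩
      rw [PySem.List.mem_pyRange_neg_one] at hmem
      obtain ⟨h25, h40⟩ := hmem
      have hsz : size = ((size.toNat : Nat) : Int) := by omega
      rw [hsz, pv_map_slice_eq_wins l size.toNat] at hdup
      exact pv_dup_mono l size.toNat _ _ (by omega) (by omega) hdup
    · intro hdup
      refine ⟨26, ?_, ?_⟩
      · rw [PySem.List.mem_pyRange_neg_one]; constructor <;> norm_num
      · have hb2 : (l.length : Int) - 26 + 1 = (l.length : Int) - 25 := by ring
        rw [hb2, pv_map_slice_eq_wins26 l]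
        exact hdup
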